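-- pv_equiv track=rewrite | github.com/include-yy/egh0bww1 | posts/2025-02-24-aitac-1/dev/1.py | is_function
-- ===== SOURCE A (Python) =====
-- def is_function(S, T, X):
--     is_injection = True
--     is_surjective = True
--
--     source_set = set()
--     target_set = set()
--
--     for x, y in X:
--         if y in target_set:
--             is_injection = False
--         if x in source_set:
--             return "存在一对多映射"
--         target_set.add(y)
--         source_set.add(x)
--     if source_set != S:
--         return "原集合不匹配"
--     if not target_set.issubset(T):
--         return "目标集合不匹配"
--     if target_set != T:
--         is_surjective = False
--     if is_surjective and is_injection:
--         return "双射"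
--     elif is_injection:
--         return "单射"
--     elif is_surjective:
--         return "满射"
--     else:
--         return "普通函数"
-- ===== SOURCE B (Python) =====
-- def is_function(S, T, X):
--     xs = sorted(x for x, _ in X)
--     if any(a == b for a, b in zip(xs, xs[1:])):
--         return "存在一对多映射"
--     if xs != sorted(S):
--         return "原集合不匹配"
--     ys = sorted(y for _, y in X)
--     if any(y not in T for y in ys):
--         return "目标集合不匹配"
--     injective = all(a != b for a, b in zip(ys, ys[1:]))
--     surjective = all(t in ys for t in T)
--     if injective and surjective:
--         return "双射"
--     if injective:
--         return "单射"
--     if surjective: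
--         return "满射"
--     return "普通函数"
-- ===== Notes on version B (the rewrite author's own statement) =====
-- stated objective: alternative
-- what changed: Replaces A's stateful hash-set scan (per-pair membership tests, mutated source/target sets, an injection flag, a mid-loop return) by a sort-then-scan algorithm: sort the first and second components, detect duplicates/injectivity by comparing adjacent elements of the sorted lists, compare with S by sorted-list equality, and decide subset/surjectivity by plain membership scans.
import Mathlib
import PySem

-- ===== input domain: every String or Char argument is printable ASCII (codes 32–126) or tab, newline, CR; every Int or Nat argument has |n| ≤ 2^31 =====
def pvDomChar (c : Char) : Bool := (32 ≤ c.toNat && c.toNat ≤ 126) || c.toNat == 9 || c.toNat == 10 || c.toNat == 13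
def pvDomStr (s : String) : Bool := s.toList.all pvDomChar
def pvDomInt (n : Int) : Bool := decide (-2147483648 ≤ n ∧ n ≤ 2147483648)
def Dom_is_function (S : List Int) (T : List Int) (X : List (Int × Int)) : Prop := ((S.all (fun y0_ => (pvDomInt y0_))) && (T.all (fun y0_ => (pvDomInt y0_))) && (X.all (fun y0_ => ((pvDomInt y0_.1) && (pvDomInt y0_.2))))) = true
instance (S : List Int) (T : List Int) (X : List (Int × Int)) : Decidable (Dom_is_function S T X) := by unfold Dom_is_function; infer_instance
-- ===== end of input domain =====

-- B replaces A's stateful hash-set scan by a sort-then-scan algorithm (adjacent comparisons on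
-- the sorted component lists, sorted-list equality against S, membership scans for subset and
-- surjectivity); objective: alternative (a genuinely different algorithm of similar cost, not a speed change).

-- ===== PORT A =====
-- the for-loop of A: state (is_injection, source_set, target_set); 'none' = the early return "存在一对多映射"
def isFunctionLoop (inj : Bool) (src tgt : PySem.Set Int) : List (Int × Int) → Option (Bool × PySem.Set Int × PySem.Set Int)
  | [] => some (inj, src, tgt)
  | (x, y) :: rest =>
      let inj' := if PySem.Set.contains tgt y then false else inj
      if PySem.Set.contains src x then none
      else isFunctionLoop inj' (PySem.Set.add src x) (PySem.Set.add tgt y) rest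

def is_function (S : List Int) (T : List Int) (X : List (Int × Int)) : String :=
  match isFunctionLoop true PySem.Set.empty PySem.Set.empty X with
  | none => "存在一对多映射"
  | some (inj, src, tgt) =>
      -- S and T are Python sets (py_type set[int]); their List Int argument holds the distinct elements
      if ¬ (PySem.Set.equal src (PySem.Set.ofList S) = true) then "原集合不匹配"
      else if ¬ (PySem.Set.issubset tgt T = true) then "目标集合不匹配"
      else
        let surj := if ¬ (PySem.Set.equal tgt (PySem.Set.ofList T) = true) then false else true
        if surj = true ∧ inj = true then "双射"
        else if inj = true then "单射"
        else if surj = true then "满射"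
        else "普通函数"

-- ===== PORT B =====
def is_function_alt (S : List Int) (T : List Int) (X : List (Int × Int)) : String :=
  let xs := PySem.List.sorted (X.map Prod.fst) (fun x => x) false
  if (xs.zip xs.tail).any (fun p => p.1 == p.2) then "存在一对多映射"
  else if xs ≠ PySem.List.sorted S (fun x => x) false then "原集合不匹配"
  else
    let ys := PySem.List.sorted (X.map Prod.snd) (fun x => x) false
    if ys.any (fun y => decide (y ∉ T)) then "目标集合不匹配"
    else
      let injective := (ys.zip ys.tail).all (fun p => p.1 != p.2)
      let surjective := T.all (fun t => decide (t ∈ ys))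
      if injective && surjective then "双射"
      else if injective then "单射"
      else if surjective then "满射"
      else "普通函数"

-- ===== PRECONDITION & SPEC =====
-- S is a Python set (py_type set[int]); under the type convention its List Int argument holds the
-- DISTINCT elements, so every real input satisfies S.Nodup — Pre_ states that encoding invariant,
-- it excludes no actual Python input.
def Pre_is_function (S : List Int) (T : List Int) (X : List (Int × Int)) : Prop := S.Nodup
instance (S : List Int) (T : List Int) (X : List (Int × Int)) : Decidable (Pre_is_function S T X) := by unfold Pre_is_function; infer_instance
def pvWitness_is_function : List Int × List Int × (List (Int × Int)) := ([1, 2], [3, 4], [(1, 3), (2, 4)])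

def Spec_is_function (S : List Int) (T : List Int) (X : List (Int × Int)) (out : String) : Prop := out = is_function_alt S T X
instance (S : List Int) (T : List Int) (X : List (Int × Int)) (out : String) : Decidable (Spec_is_function S T X out) := by unfold Spec_is_function; infer_instance

-- ===== CLAIM (what is proved, stated in full; the proofs are below) =====
def Claim_equal_is_function : Prop := ∀ (S : List Int) (T : List Int) (X : List (Int × Int)), Dom_is_function S T X → Pre_is_function S T X → Spec_is_function S T X (is_function S T X)

-- ===== LEMMAS AND PROOFS =====

-- A's loop hits the early return iff some first component repeats (relative to the source set so far)
lemma isFunctionLoop_none_iff (X : List (Int × Int)) : ∀ (inj : Bool) (src tgt : PySem.Set Int),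
    src.Nodup → (isFunctionLoop inj src tgt X = none ↔ ¬ (src ++ X.map Prod.fst).Nodup) := by
  induction X with
  | nil => intro inj src tgt h; simp [isFunctionLoop, h]
  | cons p rest ih =>
      intro inj src tgt h
      obtain ⟨x, y⟩ := p
      by_cases hx : x ∈ src
      · have hnone : isFunctionLoop inj src tgt ((x, y) :: rest) = none := by
          simp [isFunctionLoop, hx]
        rw [hnone]
        constructor
        · intro _ hcontra
          exact (List.disjoint_of_nodup_append hcontra) hx (by simp)
        · intro _; rfl
      · have hstep : isFunctionLoop inj src tgt ((x, y) :: rest)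
            = isFunctionLoop (if PySem.Set.contains tgt y then false else inj)
                (PySem.Set.add src x) (PySem.Set.add tgt y) rest := by
          simp [isFunctionLoop, hx]
        have hadd : PySem.Set.add src x = src ++ [x] := PySem.Set.add_of_not_mem hx
        have hnd' : (src ++ [x] : List Int).Nodup := by
          simp [List.nodup_append, h]
          exact fun a ha heq => hx (heq ▸ ha)
        rw [hstep, hadd, ih _ _ _ hnd', List.append_assoc, List.singleton_append]
        simp

-- when no first component repeats, A's loop completes with the accumulated sets and the injection flag
lemma isFunctionLoop_some (X : List (Int × Int)) : ∀ (inj : Bool) (src tgt : PySem.Set Int),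
    src.Nodup → tgt.Nodup → (src ++ X.map Prod.fst).Nodup →
    isFunctionLoop inj src tgt X
      = some (inj && decide ((tgt ++ X.map Prod.snd).Nodup),
              PySem.Set.update src (X.map Prod.fst), PySem.Set.update tgt (X.map Prod.snd)) := by
  induction X with
  | nil => intro inj src tgt _ ht _; simp [isFunctionLoop, PySem.Set.update, ht]
  | cons p rest ih =>
      intro inj src tgt hs ht hnd
      obtain ⟨x, y⟩ := p
      have hx : x ∉ src := by
        intro hmem
        exact (List.disjoint_of_nodup_append hnd) hmem (by simp)
      have hstep : isFunctionLoop inj src tgt ((x, y) :: rest)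
          = isFunctionLoop (if PySem.Set.contains tgt y then false else inj)
              (PySem.Set.add src x) (PySem.Set.add tgt y) rest := by
        simp [isFunctionLoop, hx]
      have haddx : PySem.Set.add src x = src ++ [x] := PySem.Set.add_of_not_mem hx
      have hs' : (PySem.Set.add src x).Nodup := by
        rw [haddx]; simp [List.nodup_append, hs]
        exact fun a ha heq => hx (heq ▸ ha)
      have hnd' : (PySem.Set.add src x ++ rest.map Prod.fst).Nodup := by
        rw [haddx, List.append_assoc, List.singleton_append]
        simpa using hnd
      rw [hstep, ih _ _ _ hs' (PySem.Set.nodup_add _ _ ht) hnd']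
      simp only [List.map_cons, PySem.Set.update_cons]
      by_cases hy : y ∈ tgt
      · have hcy : (if PySem.Set.contains tgt y then false else inj) = false := by
          simp [hy]
        have haddy : PySem.Set.add tgt y = tgt := PySem.Set.add_of_mem hy
        have : ¬ (tgt ++ (y :: rest.map Prod.snd)).Nodup := by
          intro hcontra
          exact (List.disjoint_of_nodup_append hcontra) hy (by simp)
        simp [haddy, this]
        exact fun h => absurd hy h
      · have hcy : (if PySem.Set.contains tgt y then false else inj) = inj := by
          simp [hy]
        have haddy : PySem.Set.add tgt y = tgt ++ [y] := PySem.Set.add_of_not_mem hy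
        rw [hcy]
        have hre : ((tgt ++ [y]) ++ rest.map Prod.snd).Nodup ↔ (tgt ++ (y :: rest.map Prod.snd)).Nodup := by
          rw [List.append_assoc, List.singleton_append]
        simp [haddy]
        rfl

-- '(x, x) is never a pair of adjacent elements' is the same as adjacent elements being pairwise distinct
lemma adj_forall_iff (l : List Int) :
    (∀ x : Int, (x, x) ∉ l.zip l.tail) ↔ l.IsChain (· ≠ ·) := by
  induction l with
  | nil => simp
  | cons a t ih =>
      cases t with
      | nil => simp
      | cons b t' =>
          rw [show ((a :: b :: t').zip (a :: b :: t').tail) = (a, b) :: ((b :: t').zip t') from rfl,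
            List.isChain_cons_cons, ← ih]
          constructor
          · intro h
            refine ⟨fun he => h b (by simp [he]), fun x hx => ?_⟩
            have := h x
            simp at this
            exact this.2 hx
          · rintro ⟨hab, h⟩ x hx
            rcases List.mem_cons.mp hx with he | hm
            · injection he with h1 h2
              exact hab (h1.symm.trans h2)
            · exact h x hm

-- for a weakly increasing list, adjacent distinctness is the same as having no duplicates
lemma chain'_ne_iff_nodup (l : List Int) (h : l.Pairwise (· ≤ ·)) :
    l.IsChain (· ≠ ·) ↔ l.Nodup := by
  constructor
  · intro hc
    have hlt : l.IsChain (· < ·) := by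
      rw [List.isChain_iff_getElem] at hc ⊢
      intro i hi
      exact lt_of_le_of_ne
        ((List.pairwise_iff_getElem.mp h) i (i + 1) (by omega) hi (by omega)) (hc i hi)
    exact (List.isChain_iff_pairwise.mp hlt).imp (fun hab => ne_of_lt hab)
  · intro hnd
    rw [List.isChain_iff_getElem]
    intro i hi
    exact (List.pairwise_iff_getElem.mp hnd) i (i + 1) (by omega) hi (by omega)

-- adjacent distinctness of the sorted list = no duplicates in the original list
lemma adj_sorted_iff_nodup (l : List Int) :
    (∀ x : Int, (x, x) ∉ (PySem.List.sorted l (fun x => x) false).zip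
      (PySem.List.sorted l (fun x => x) false).tail) ↔ l.Nodup := by
  rw [adj_forall_iff]
  rw [chain'_ne_iff_nodup _ (by simpa using PySem.List.sorted_pairwise (xs := l) (key := fun x => x))]
  exact (PySem.List.sorted_perm ..).nodup_iff

-- sorted-list equality = equality as sets, for duplicate-free lists
lemma sorted_eq_iff_set_equal (a b : List Int) (ha : a.Nodup) (hb : b.Nodup) :
    (PySem.List.sorted a (fun x => x) false = PySem.List.sorted b (fun x => x) false)
      ↔ (PySem.Set.equal (PySem.Set.ofList a) (PySem.Set.ofList b) = true) := by
  rw [PySem.List.sorted_id_eq_sorted_id_iff_perm, PySem.Set.equal_iff,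
    List.perm_ext_iff_of_nodup ha hb]
  simp [PySem.Set.mem_ofList]

-- ===== VERDICT (by name: the statement is the Claim_ definition above) =====
set_option maxHeartbeats 1000000 in
theorem is_function_spec : Claim_equal_is_function := by
  intro S T X _ hpre
  unfold Pre_is_function at hpre
  unfold Spec_is_function is_function is_function_alt
  by_cases hnd : (X.map Prod.fst).Nodup
  · -- no repeated first component: A's loop completes, B's adjacent scan finds no duplicate
    have hsome := isFunctionLoop_some X true PySem.Set.empty PySem.Set.empty
      (by simp [PySem.Set.empty]) (by simp [PySem.Set.empty]) (by simpa [PySem.Set.empty] using hnd)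
    have hupd : ∀ l : List Int, PySem.Set.update PySem.Set.empty l = PySem.Set.ofList l := by
      intro l; rfl
    rw [hsome, hupd, hupd]
    have c1 : ∀ x : Int, (x, x) ∉ (PySem.List.sorted (X.map Prod.fst) (fun x => x) false).zip
        (PySem.List.sorted (X.map Prod.fst) (fun x => x) false).tail :=
      (adj_sorted_iff_nodup _).mpr hnd
    have hS_iff : (PySem.List.sorted (X.map Prod.fst) (fun x => x) false
          = PySem.List.sorted S (fun x => x) false)
        ↔ (PySem.Set.equal (PySem.Set.ofList (X.map Prod.fst)) (PySem.Set.ofList S) = true) :=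
      sorted_eq_iff_set_equal _ _ hnd hpre
    have hsub_iff : (∀ y ∈ PySem.List.sorted (X.map Prod.snd) (fun x => x) false, y ∈ T)
        ↔ (PySem.Set.issubset (PySem.Set.ofList (X.map Prod.snd)) T = true) := by
      rw [PySem.Set.issubset_iff]
      simp [PySem.List.mem_sorted, PySem.Set.mem_ofList]
    have hinj_iff : (∀ x : Int, (x, x) ∉ (PySem.List.sorted (X.map Prod.snd) (fun x => x) false).zip
          (PySem.List.sorted (X.map Prod.snd) (fun x => x) false).tail)
        ↔ (X.map Prod.snd).Nodup := adj_sorted_iff_nodup _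
    have hsur_iff : (PySem.Set.equal (PySem.Set.ofList (X.map Prod.snd)) (PySem.Set.ofList T) = true)
        ↔ ((∀ y ∈ X.map Prod.snd, y ∈ T) ∧ (∀ t ∈ T, t ∈ X.map Prod.snd)) := by
      rw [PySem.Set.equal_iff]
      simp only [PySem.Set.mem_ofList]
      constructor
      · intro h
        exact ⟨fun y hy => (h y).mp hy, fun t ht => (h t).mpr ht⟩
      · rintro ⟨h1, h2⟩ x
        exact ⟨fun hx => h1 x hx, fun hx => h2 x hx⟩
    simp only [PySem.Set.empty, List.nil_append, Bool.true_and]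
    simp [c1]
    have memsy : ∀ y : Int, (y ∈ PySem.List.sorted (X.map Prod.snd) (fun x => x) false)
        ↔ y ∈ X.map Prod.snd := fun y => PySem.List.mem_sorted ..
    by_cases pS : PySem.Set.equal (PySem.Set.ofList (X.map Prod.fst)) (PySem.Set.ofList S) = true
    · have hSB : (PySem.List.sorted (X.map Prod.fst) (fun x => x) false)
          = PySem.List.sorted S (fun x => x) false := hS_iff.mpr pS
      by_cases psub : PySem.Set.issubset (PySem.Set.ofList (X.map Prod.snd)) T = true
      · have hsubm : ∀ y ∈ X.map Prod.snd, y ∈ T := by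
          intro y hy
          exact (hsub_iff.mpr psub) y ((memsy y).mpr hy)
        have hXT : ∀ a b : Int, (a, b) ∈ X → b ∈ T := fun a b hab =>
          hsubm b (List.mem_map_of_mem (f := Prod.snd) hab)
        by_cases pinj : (X.map Prod.snd).Nodup
        · have binjT : (((PySem.List.sorted (X.map Prod.snd) (fun x => x) false).zip
              (PySem.List.sorted (X.map Prod.snd) (fun x => x) false).tail).all
                (fun p => p.1 != p.2)) = true := by
            rw [List.all_eq_true]
            rintro ⟨a, b⟩ hp
            simp only [bne_iff_ne, ne_eq]
            intro hab
            exact (hinj_iff.mpr pinj) a (by simpa [hab] using hp)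
          by_cases psur : PySem.Set.equal (PySem.Set.ofList (X.map Prod.snd)) (PySem.Set.ofList T) = true
          · have bsurT : (T.all (fun t => decide
                (t ∈ PySem.List.sorted (X.map Prod.snd) (fun x => x) false))) = true := by
              rw [List.all_eq_true]
              intro t ht
              simpa using (memsy t).mpr ((hsur_iff.mp psur).2 t ht)
            simp [pS, hSB, psub, pinj, psur, binjT, bsurT]
            all_goals exact fun b a hab => hXT a b hab
          · have bsurF : (T.all (fun t => decide
                (t ∈ PySem.List.sorted (X.map Prod.snd) (fun x => x) false))) = false := by
              rw [List.all_eq_false]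
              have : ¬ ∀ t ∈ T, t ∈ X.map Prod.snd := fun h => psur (hsur_iff.mpr ⟨hsubm, h⟩)
              push Not at this
              obtain ⟨t, ht, htm⟩ := this
              exact ⟨t, ht, by simpa using fun hm => htm ((memsy t).mp hm)⟩
            simp [pS, hSB, psub, pinj, psur, binjT, bsurF]
            all_goals exact fun b a hab => hXT a b hab
        · have binjF : (((PySem.List.sorted (X.map Prod.snd) (fun x => x) false).zip
              (PySem.List.sorted (X.map Prod.snd) (fun x => x) false).tail).all
                (fun p => p.1 != p.2)) = false := by
            rw [List.all_eq_false]
            have : ¬ ∀ x : Int, (x, x) ∉ (PySem.List.sorted (X.map Prod.snd) (fun x => x) false).zip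
                (PySem.List.sorted (X.map Prod.snd) (fun x => x) false).tail :=
              fun h => pinj (hinj_iff.mp h)
            push Not at this
            obtain ⟨x, hx⟩ := this
            exact ⟨(x, x), hx, by simp⟩
          by_cases psur : PySem.Set.equal (PySem.Set.ofList (X.map Prod.snd)) (PySem.Set.ofList T) = true
          · have bsurT : (T.all (fun t => decide
                (t ∈ PySem.List.sorted (X.map Prod.snd) (fun x => x) false))) = true := by
              rw [List.all_eq_true]
              intro t ht
              simpa using (memsy t).mpr ((hsur_iff.mp psur).2 t ht)
            simp [pS, hSB, psub, pinj, psur, binjF, bsurT]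
            all_goals exact fun b a hab => hXT a b hab
          · have bsurF : (T.all (fun t => decide
                (t ∈ PySem.List.sorted (X.map Prod.snd) (fun x => x) false))) = false := by
              rw [List.all_eq_false]
              have : ¬ ∀ t ∈ T, t ∈ X.map Prod.snd := fun h => psur (hsur_iff.mpr ⟨hsubm, h⟩)
              push Not at this
              obtain ⟨t, ht, htm⟩ := this
              exact ⟨t, ht, by simpa using fun hm => htm ((memsy t).mp hm)⟩
            simp [pS, hSB, psub, pinj, psur, binjF, bsurF]
            all_goals exact fun b a hab => hXT a b hab
      · simp [pS, hSB, psub]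
        intro h
        exact (psub (hsub_iff.mp (fun y hy => by
          obtain ⟨⟨a, b⟩, hab, rfl⟩ := List.mem_map.mp ((memsy y).mp hy)
          exact h b a hab))).elim
    · have hSB : ¬ ((PySem.List.sorted (X.map Prod.fst) (fun x => x) false)
          = PySem.List.sorted S (fun x => x) false) := fun h => pS (hS_iff.mp h)
      simp [pS, hSB]
  · -- a repeated first component: A returns early, B's adjacent scan finds the duplicate
    have hnone : isFunctionLoop true PySem.Set.empty PySem.Set.empty X = none := by
      rw [isFunctionLoop_none_iff X true PySem.Set.empty PySem.Set.empty (by simp [PySem.Set.empty])]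
      simpa [PySem.Set.empty] using hnd
    rw [hnone]
    have hdup : ¬ ∀ x : Int, (x, x) ∉ (PySem.List.sorted (X.map Prod.fst) (fun x => x) false).zip
        (PySem.List.sorted (X.map Prod.fst) (fun x => x) false).tail :=
      fun h => hnd ((adj_sorted_iff_nodup _).mp h)
    push Not at hdup
    simp only []
    rw [if_pos (by simpa using hdup)]
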